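-- pv_equiv track=rewrite | github.com/kpet/OpenCL-Tools | src/common/oclspec.py | camel_to_all_caps
-- ===== SOURCE A (Python) =====
-- def camel_to_all_caps(name):
--     dname = ''
--     p = ''
--     for c in name:
--         if c.isupper():
--             if not p.isupper() and not p.isdigit():
--                 dname += '_'
--             dname += c
--         else:
--             dname += c.upper()
--         p = c
--     return dname[3:]
-- ===== SOURCE B (Python) =====
-- def camel_to_all_caps(name):
--     # Word-segmentation approach: cut the name into maximal camel words
--     # (a word ends before an uppercase char not preceded by an uppercase or
--     # digit), then join the words with '_' (with a leading '_' when the name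
--     # starts a word, i.e. begins with an uppercase char), uppercase the whole
--     # string once, and drop the 3-char prefix.
--     def words(s):
--         out = []
--         while s:
--             j = 1
--             while j < len(s) and not (s[j].isupper()
--                                       and not (s[j-1].isupper() or s[j-1].isdigit())):
--                 j += 1
--             out.append(s[:j])
--             s = s[j:]
--         return out
--     lead = '_' if name and name[0].isupper() else ''
--     return (lead + '_'.join(words(name))).upper()[3:]
-- ===== Notes on version B (the rewrite author's own statement) =====
-- stated objective: alternative
-- what changed: A emits output char by char while tracking a previous-char state variable; B instead segments the name into maximal camel words (inner scan finds each word's end), then joins the word list with '_' and uppercases the whole string once at the end.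
import Mathlib
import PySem

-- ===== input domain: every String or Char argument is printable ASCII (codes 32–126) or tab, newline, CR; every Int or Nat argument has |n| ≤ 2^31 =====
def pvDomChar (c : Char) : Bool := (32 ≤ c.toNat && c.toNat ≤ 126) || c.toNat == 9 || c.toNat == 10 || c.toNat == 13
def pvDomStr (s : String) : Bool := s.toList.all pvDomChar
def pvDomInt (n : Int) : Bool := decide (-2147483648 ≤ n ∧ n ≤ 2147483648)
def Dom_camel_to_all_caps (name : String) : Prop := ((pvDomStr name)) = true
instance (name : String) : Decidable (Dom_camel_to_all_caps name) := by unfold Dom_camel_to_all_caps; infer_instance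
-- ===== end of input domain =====

-- B replaces A's stateful char-by-char emission by word segmentation: cut into maximal camel words, join with '_', uppercase once (alternative decomposition, same cost).
-- ===== PORT A =====
-- loop body of A's 'for c in name' (state: (dname, p); p = '' is modelled as none)
def ctacStep (s : List Char × Option Char) (c : Char) : List Char × Option Char :=
  if PySem.Chars.isupper c then
    ((if !(s.2.elim false PySem.Chars.isupper) && !(s.2.elim false PySem.Chars.isdigit)
      then s.1 ++ ['_'] else s.1) ++ [c], some c)
  else (s.1 ++ [PySem.Chars.upperChar c], some c)

def camel_to_all_caps (name : String) : String :=
  String.ofList (PySem.List.slice (name.toList.foldl ctacStep ([], none)).1 (some 3) none)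

-- ===== PORT B =====
-- the word-boundary test of Source B's inner while condition
def ctacBoundary (p c : Char) : Bool :=
  PySem.Chars.isupper c && !(PySem.Chars.isupper p || PySem.Chars.isdigit p)

-- Source B's inner while loop: split off the current word's remainder after its
-- first char (predecessor p), stopping at the next boundary
def ctacTakeWord (p : Char) : List Char → List Char × List Char
  | [] => ([], [])
  | c :: t => if ctacBoundary p c then ([], c :: t)
              else let wr := ctacTakeWord c t; (c :: wr.1, wr.2)

theorem ctacTakeWord_rest_le (p : Char) (t : List Char) :
    (ctacTakeWord p t).2.length ≤ t.length := by
  induction t generalizing p with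
  | nil => simp [ctacTakeWord]
  | cons c t ih =>
    simp only [ctacTakeWord]
    split
    · simp
    · exact le_trans (ih c) (Nat.le_succ _)

-- Source B's outer while loop: the list of maximal camel words
def ctacWords : List Char → List (List Char)
  | [] => []
  | c :: t =>
      let wr := ctacTakeWord c t
      (c :: wr.1) :: ctacWords wr.2
  termination_by s => s.length
  decreasing_by exact Nat.lt_succ_of_le (ctacTakeWord_rest_le c t)

-- '_'.join, ported by hand (exact: separator between consecutive elements)
def ctacJoin : List (List Char) → List Char
  | [] => []
  | w :: ws => w ++ ws.flatMap (fun v => '_' :: v)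

def camel_to_all_caps_alt (name : String) : String :=
  let lead : List Char :=
    match name.toList with
    | [] => []
    | c :: _ => if PySem.Chars.isupper c then ['_'] else []
  String.ofList (PySem.List.slice
    (PySem.Chars.upper (lead ++ ctacJoin (ctacWords name.toList))) (some 3) none)

-- ===== PRECONDITION & SPEC =====
def Spec_camel_to_all_caps (name : String) (out : String) : Prop := out = camel_to_all_caps_alt name
instance (name : String) (out : String) : Decidable (Spec_camel_to_all_caps name out) := by unfold Spec_camel_to_all_caps; infer_instance

-- ===== CLAIM (what is proved, stated in full; the proofs are below) =====
def Claim_equal_camel_to_all_caps : Prop := ∀ (name : String), Dom_camel_to_all_caps name → Spec_camel_to_all_caps name (camel_to_all_caps name)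

-- ===== LEMMAS AND PROOFS =====

-- the chunk A emits for one char c with predecessor p
def ctacChunk (p : Option Char) (c : Char) : List Char :=
  if PySem.Chars.isupper c &&
     !(p.elim false PySem.Chars.isupper || p.elim false PySem.Chars.isdigit)
  then ['_', c] else [c]

-- A's emission stream, written as structural recursion carrying the predecessor
def ctacEmit (p : Option Char) : List Char → List Char
  | [] => []
  | c :: t => ctacChunk p c ++ ctacEmit (some c) t

lemma ctac_upperChar_underscore : PySem.Chars.upperChar '_' = '_' := by decide

lemma ctac_upperChar_of_isupper (c : Char) (h : PySem.Chars.isupper c = true) :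
    PySem.Chars.upperChar c = c := by
  simp only [PySem.Chars.isupper, Bool.and_eq_true, decide_eq_true_eq] at h
  have hl : PySem.Chars.islower c = false := by
    simp only [PySem.Chars.islower]
    have : ¬ ('a' ≤ c) := fun ha => absurd (ha.trans h.2) (by decide)
    simp [this]
  simp [PySem.Chars.upperChar, hl]

-- A's fold equals one whole-stream upper of the emission stream
lemma ctac_fold_eq (cs : List Char) (p : Option Char) (acc : List Char) :
    (cs.foldl ctacStep (acc, p)).1 = acc ++ PySem.Chars.upper (ctacEmit p cs) := by
  induction cs generalizing p acc with
  | nil => simp [ctacEmit, PySem.Chars.upper]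
  | cons c t ih =>
    rw [List.foldl_cons]
    by_cases hu : PySem.Chars.isupper c = true
    · by_cases hp : (!(p.elim false PySem.Chars.isupper) && !(p.elim false PySem.Chars.isdigit)) = true
      · obtain ⟨hp1, hp2⟩ :
            p.elim false PySem.Chars.isupper = false ∧ p.elim false PySem.Chars.isdigit = false := by
          simpa using hp
        rw [show ctacStep (acc, p) c = (acc ++ ['_'] ++ [c], some c) by
              simp [ctacStep, hu, hp]]
        rw [ih]
        simp [ctacEmit, ctacChunk, hu, hp1, hp2, PySem.Chars.upper,
          ctac_upperChar_underscore, ctac_upperChar_of_isupper c hu]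
      · have hOr : p.elim false PySem.Chars.isupper = true ∨ p.elim false PySem.Chars.isdigit = true := by
          by_cases h1 : p.elim false PySem.Chars.isupper = true
          · exact Or.inl h1
          · right
            simp only [Bool.not_eq_true] at h1
            simpa [h1] using hp
        rw [show ctacStep (acc, p) c = (acc ++ [c], some c) by simp [ctacStep, hu, hp]]
        rw [ih]
        rcases hOr with h | h <;>
          simp [ctacEmit, ctacChunk, h, PySem.Chars.upper, ctac_upperChar_of_isupper c hu]
    · rw [show ctacStep (acc, p) c = (acc ++ [PySem.Chars.upperChar c], some c) by
            simp [ctacStep, hu]]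
      rw [ih]
      simp [ctacEmit, ctacChunk, hu, PySem.Chars.upper]

-- join of the remaining words, each preceded by '_'
def ctacPj (ws : List (List Char)) : List Char := ws.flatMap (fun v => '_' :: v)

lemma ctac_chunk_some (p c : Char) :
    ctacChunk (some p) c = if ctacBoundary p c then ['_', c] else [c] := by
  simp [ctacChunk, ctacBoundary]

-- A's stream after a word's first char = the rest of that word, then the
-- '_'-prefixed join of the remaining words
lemma ctac_emit_some (t : List Char) (p : Char) :
    ctacEmit (some p) t =
      (ctacTakeWord p t).1 ++ ctacPj (ctacWords (ctacTakeWord p t).2) := by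
  induction t generalizing p with
  | nil => simp [ctacEmit, ctacTakeWord, ctacWords, ctacPj]
  | cons c t ih =>
    by_cases hb : ctacBoundary p c = true
    · simp only [ctacEmit, ctac_chunk_some, hb, if_pos, ctacTakeWord]
      rw [ih c]
      simp [ctacWords, ctacPj]
    · simp only [ctacEmit, ctac_chunk_some, hb, ctacTakeWord]
      rw [ih c]
      simp

-- B's staged construction equals A's emission stream
lemma ctac_words_eq (cs : List Char) :
    (match cs with
     | [] => ([] : List Char)
     | c :: _ => if PySem.Chars.isupper c then ['_'] else []) ++
      ctacJoin (ctacWords cs) = ctacEmit none cs := by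
  cases cs with
  | nil => simp [ctacJoin, ctacWords, ctacEmit]
  | cons c t =>
    have hchunk : ctacChunk none c = if PySem.Chars.isupper c then ['_', c] else [c] := by
      simp [ctacChunk]
    simp only [ctacEmit, hchunk, ctacWords, ctacJoin]
    rw [ctac_emit_some t c]
    by_cases hu : PySem.Chars.isupper c = true <;> simp [hu, ctacPj]

-- ===== VERDICT (by name: the statement is the Claim_ definition above) =====
theorem camel_to_all_caps_spec : Claim_equal_camel_to_all_caps := by
  intro name _
  unfold Spec_camel_to_all_caps camel_to_all_caps camel_to_all_caps_alt
  rw [ctac_fold_eq]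
  rw [← ctac_words_eq name.toList]
  simp
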